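-- pv_equiv track=rewrite | github.com/kakaka6c/EduSmart | latex2mathjax.py | convert_latex_to_mathjax
-- ===== SOURCE A (Python) =====
-- def convert_latex_to_mathjax(string):
--     result = ''
--     replace_char = '\\'
--     odd_replacement = '\\\\('
--     even_replacement = '\\\\)'
--     dollar_count = 0
--
--     for char in string:
--         if char == '$':
--             dollar_count += 1
--             if dollar_count % 2 == 0:
--                 result += even_replacement
--             else:
--                 result += odd_replacement
--         else:
--             result += char
--
--     return result
-- ===== SOURCE B (Python) =====
-- def convert_latex_to_mathjax(string):
--     parts = string.split('$')
--     pieces = [parts[0]]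
--     for i, seg in enumerate(parts[1:], 1):
--         pieces.append('\\\\(' if i % 2 == 1 else '\\\\)')
--         pieces.append(seg)
--     return ''.join(pieces)
-- ===== Notes on version B (the rewrite author's own statement) =====
-- stated objective: idiomatic
-- what changed: Replaces the per-character scan with a running dollar counter by splitting on the dollar separator and joining the segments with alternating delimiters chosen by the 1-based segment index.
import Mathlib
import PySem

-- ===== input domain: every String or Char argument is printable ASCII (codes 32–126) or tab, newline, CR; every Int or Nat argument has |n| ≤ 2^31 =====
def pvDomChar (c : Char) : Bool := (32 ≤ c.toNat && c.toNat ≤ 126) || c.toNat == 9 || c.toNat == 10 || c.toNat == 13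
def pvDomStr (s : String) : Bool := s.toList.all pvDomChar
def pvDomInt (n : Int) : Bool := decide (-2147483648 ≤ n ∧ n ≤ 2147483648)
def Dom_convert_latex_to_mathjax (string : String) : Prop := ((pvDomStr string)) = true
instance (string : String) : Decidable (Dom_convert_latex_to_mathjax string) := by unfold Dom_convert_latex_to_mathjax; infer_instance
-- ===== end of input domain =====

-- B replaces A's per-character scan + running dollar counter by split-on-'$' and a
-- parity-indexed join of the segments (objective: idiomatic; avoids quadratic string appends).

-- ===== PORT A =====
-- per-character loop, state = (result so far, dollar_count)
def convert_latex_to_mathjax (string : String) : String :=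
  let st := string.toList.foldl
    (fun (st : List Char × Int) c =>
      if c == '$' then
        let dc := st.2 + 1
        if PySem.Int.mod dc 2 == 0 then (st.1 ++ ['\\', '\\', ')'], dc)
        else (st.1 ++ ['\\', '\\', '('], dc)
      else (st.1 ++ [c], st.2))
    ([], 0)
  String.ofList st.1

-- ===== PORT B =====
-- split on '$', then join segments with alternating delimiters chosen by the 1-based index
def convert_latex_to_mathjax_alt (string : String) : String :=
  let parts : List (List Char) := PySem.Chars.splitOn string.toList ['$']
  let pieces : List (List Char) := [parts.headD []]  -- parts[0]; split never returns an empty list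
  let pieces := (PySem.List.enumerate parts.tail 1).foldl
    (fun ps (p : Int × List Char) =>
      ps ++ [if PySem.Int.mod p.1 2 == 1 then ['\\', '\\', '('] else ['\\', '\\', ')'], p.2])
    pieces
  String.ofList (PySem.Chars.join [] pieces)

-- ===== PRECONDITION & SPEC =====
def Spec_convert_latex_to_mathjax (string : String) (out : String) : Prop := out = convert_latex_to_mathjax_alt string
instance (string : String) (out : String) : Decidable (Spec_convert_latex_to_mathjax string out) := by unfold Spec_convert_latex_to_mathjax; infer_instance

-- ===== CLAIM (what is proved, stated in full; the proofs are below) =====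
def Claim_equal_convert_latex_to_mathjax : Prop := ∀ (string : String), Dom_convert_latex_to_mathjax string → Spec_convert_latex_to_mathjax string (convert_latex_to_mathjax string)

-- ===== LEMMAS AND PROOFS =====

-- common specification: output of the scan starting with dollar_count = k
def pvF (cs : List Char) (k : Int) : List Char :=
  match cs with
  | [] => []
  | c :: rest =>
    if c == '$' then
      (if PySem.Int.mod (k + 1) 2 == 0 then ['\\', '\\', ')'] else ['\\', '\\', '(']) ++ pvF rest (k + 1)
    else c :: pvF rest k

-- recursive characterisation of splitting on a single '$'
def pvSplitD (cs : List Char) : List (List Char) :=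
  match cs with
  | [] => [[]]
  | c :: rest =>
    if c == '$' then [] :: pvSplitD rest
    else (pvSplitD rest).modifyHead (c :: ·)

lemma pvSplitD_ne_nil (cs : List Char) : pvSplitD cs ≠ [] := by
  induction cs with
  | nil => simp [pvSplitD]
  | cons c rest ih =>
    simp only [pvSplitD]
    split
    · simp
    · cases h : pvSplitD rest with
      | nil => exact absurd h ih
      | cons a t => simp


lemma pvSplitOn_go_eq :
    ∀ (fuel : Nat) (l cur : List Char) (acc : List (List Char)),
      l.length ≤ fuel →
      PySem.Chars.splitOn.go ['$'] fuel l cur acc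
        = acc.reverse ++ (pvSplitD l).modifyHead (cur.reverse ++ ·) := by
  intro fuel
  induction fuel with
  | zero =>
    intro l cur acc h
    have : l = [] := List.eq_nil_of_length_eq_zero (Nat.le_zero.mp h)
    subst this
    simp [PySem.Chars.splitOn.go, pvSplitD]
  | succ n ih =>
    intro l cur acc h
    cases l with
    | nil => simp [PySem.Chars.splitOn.go, pvSplitD]
    | cons c rest =>
      simp only [PySem.Chars.splitOn.go]
      by_cases hc : c = '$'
      · subst hc
        have hpre : List.isPrefixOf ['$'] ('$' :: rest) = true := by
          simp [List.isPrefixOf]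
        rw [if_pos hpre]
        simp only [List.length_cons] at h
        rw [ih _ _ _ (by simp; omega)]
        obtain ⟨a, t, hat⟩ : ∃ a t, pvSplitD rest = a :: t := by
          cases hh : pvSplitD rest with
          | nil => exact absurd hh (pvSplitD_ne_nil rest)
          | cons a t => exact ⟨a, t, rfl⟩
        simp [pvSplitD, hat]
      · have hpre : List.isPrefixOf ['$'] (c :: rest) = false := by
          simp [List.isPrefixOf]
          exact fun hh => hc hh.symm
        rw [if_neg (by simp [hpre])]
        simp only [List.length_cons] at h
        rw [ih _ _ _ (by omega)]
        simp only [pvSplitD, if_neg (by simp [hc] : ¬ (c == '$') = true)]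
        obtain ⟨a, t, hat⟩ : ∃ a t, pvSplitD rest = a :: t := by
          cases hh : pvSplitD rest with
          | nil => exact absurd hh (pvSplitD_ne_nil rest)
          | cons a t => exact ⟨a, t, rfl⟩
        simp [hat]

lemma pvSplitOn_eq (cs : List Char) :
    PySem.Chars.splitOn cs ['$'] = pvSplitD cs := by
  have := pvSplitOn_go_eq (cs.length + 1) cs [] [] (by omega)
  simp only [PySem.Chars.splitOn]
  rw [this]
  obtain ⟨a, t, hat⟩ : ∃ a t, pvSplitD cs = a :: t := by
    cases hh : pvSplitD cs with
    | nil => exact absurd hh (pvSplitD_ne_nil cs)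
    | cons a t => exact ⟨a, t, rfl⟩
  simp [hat]

-- A's loop computes pvF
lemma pvA_loop (cs : List Char) :
    ∀ (acc : List Char) (k : Int),
      (cs.foldl
        (fun (st : List Char × Int) c =>
          if c == '$' then
            let dc := st.2 + 1
            if PySem.Int.mod dc 2 == 0 then (st.1 ++ ['\\', '\\', ')'], dc)
            else (st.1 ++ ['\\', '\\', '('], dc)
          else (st.1 ++ [c], st.2))
        (acc, k)).1 = acc ++ pvF cs k := by
  induction cs with
  | nil => intro acc k; simp [pvF]
  | cons c rest ih =>
    intro acc k
    simp only [List.foldl_cons, pvF]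
    by_cases hc : (c == '$') = true
    · rw [if_pos hc, if_pos hc]
      by_cases hm : (PySem.Int.mod (k + 1) 2 == 0) = true
      · simp only [hm, if_pos hm, ih]; simp
      · simp only [eq_false_of_ne_true hm, if_neg hm, ih]; simp
    · rw [if_neg hc, if_neg hc, ih]; simp

-- segment-level join with delimiters, index starting at i
def pvG (ps : List (List Char)) (i : Int) : List Char :=
  match ps with
  | [] => []
  | p :: rest =>
    (if PySem.Int.mod i 2 == 1 then ['\\', '\\', '('] else ['\\', '\\', ')']) ++ p ++ pvG rest (i + 1)

lemma pvMod2 (k : Int) : PySem.Int.mod k 2 = 0 ∨ PySem.Int.mod k 2 = 1 := by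
  have h1 : Int.fmod k 2 = k % 2 := by
    rw [Int.fmod_eq_emod]
    simp
  simp only [PySem.Int.mod, h1]
  omega

lemma pvDelim (i : Int) (x y : List Char) :
    (if PySem.Int.mod i 2 == 0 then x else y) = (if PySem.Int.mod i 2 == 1 then y else x) := by
  rcases pvMod2 i with h | h <;> rw [h] <;> simp

lemma pvJoinNil (xs : List (List Char)) : PySem.Chars.join [] xs = xs.flatten := by
  induction xs with
  | nil => simp [PySem.Chars.join, List.intercalate]
  | cons x rest ih =>
    cases rest with
    | nil => simp [PySem.Chars.join, List.intercalate]
    | cons y t =>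
      simp only [PySem.Chars.join, List.intercalate, List.intersperse] at ih ⊢
      simp [ih]

-- B's fold flattens to pvG
lemma pvB_loop (ps : List (List Char)) :
    ∀ (pieces : List (List Char)) (i : Int),
      PySem.Chars.join []
        ((PySem.List.enumerate ps i).foldl
          (fun acc (p : Int × List Char) =>
            acc ++ [if PySem.Int.mod p.1 2 == 1 then ['\\', '\\', '('] else ['\\', '\\', ')'], p.2])
          pieces)
        = PySem.Chars.join [] pieces ++ pvG ps i := by
  induction ps with
  | nil => intro pieces i; simp [PySem.List.enumerate, pvG]
  | cons p rest ih =>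
    intro pieces i
    rw [PySem.List.enumerate_cons]
    simp only [List.foldl_cons]
    rw [ih]
    simp [pvJoinNil, pvG]

-- the bridge: character scan = head segment ++ parity-indexed joined tail
lemma pvMain (cs : List Char) :
    ∀ (k : Int), pvF cs k = (pvSplitD cs).headD [] ++ pvG (pvSplitD cs).tail (k + 1) := by
  induction cs with
  | nil => intro k; simp [pvF, pvSplitD, pvG]
  | cons c rest ih =>
    intro k
    by_cases hc : (c == '$') = true
    · simp only [pvF, pvSplitD, if_pos hc]
      obtain ⟨a, t, hat⟩ : ∃ a t, pvSplitD rest = a :: t := by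
        cases hh : pvSplitD rest with
        | nil => exact absurd hh (pvSplitD_ne_nil rest)
        | cons a t => exact ⟨a, t, rfl⟩
      rw [ih, hat]
      simp only [List.headD_cons, List.tail_cons, List.tail, List.headD, List.nil_append, pvG]
      rw [pvDelim]
      simp
    · simp only [pvF, pvSplitD, if_neg hc]
      obtain ⟨a, t, hat⟩ : ∃ a t, pvSplitD rest = a :: t := by
        cases hh : pvSplitD rest with
        | nil => exact absurd hh (pvSplitD_ne_nil rest)
        | cons a t => exact ⟨a, t, rfl⟩
      rw [ih, hat]
      simp [hat]

-- ===== VERDICT (by name: the statement is the Claim_ definition above) =====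
theorem convert_latex_to_mathjax_spec : Claim_equal_convert_latex_to_mathjax := by
  intro s _
  unfold Spec_convert_latex_to_mathjax convert_latex_to_mathjax convert_latex_to_mathjax_alt
  simp only [pvSplitOn_eq, pvA_loop, pvB_loop]
  rw [pvMain s.toList 0]
  have : PySem.Chars.join [] [(pvSplitD s.toList).headD []] = (pvSplitD s.toList).headD [] := by
    simp [PySem.Chars.join, List.intercalate]
  rw [this]
  norm_num
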